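-- pv_equiv track=rewrite | github.com/esteban-miller/1.Ejercicios-python-funciones-procesamiento | Bloque_1_Esteban_Miller.py | string_con_mas_consonantes
-- ===== SOURCE A (Python) =====
-- def contar_consonantes(palabra):
--     consonantes ="bcdfghjklmnpqrstvwxyzBCDFGHJKLMNPQRSTVWXYZ"
--     return sum(1 for char in palabra if char in consonantes)
--
-- def string_con_mas_consonantes(lista):
--     max_consonantes = -1
--     resultado__ = ""
--     indice = -1
--
--     for i, palabra in enumerate(lista):
--         num_consonantes = contar_consonantes(palabra)
--         if num_consonantes > max_consonantes:
--             max_consonantes = num_consonantes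
--             resultado__ = palabra
--             indice = i
--     return resultado__ , len(resultado__), indice
-- ===== SOURCE B (Python) =====
-- def string_con_mas_consonantes(lista):
--     if not lista:
--         return ("", 0, -1)
--     CONS = "bcdfghjklmnpqrstvwxyzBCDFGHJKLMNPQRSTVWXYZ"
--     order = sorted(range(len(lista)), key=lambda i: -sum(1 for ch in lista[i] if ch in CONS))
--     best = order[0]
--     return lista[best], len(lista[best]), best
-- ===== Notes on version B (the rewrite author's own statement) =====
-- stated objective: alternative
-- what changed: A's single fused count-and-track loop is replaced by a sort-then-pick algorithm: stably sort the indices by negated consonant count (sorted(range(n), key=...)) and take the first index of that order; stability of Python's sort preserves A's first-wins tie-breaking.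
import Mathlib
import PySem

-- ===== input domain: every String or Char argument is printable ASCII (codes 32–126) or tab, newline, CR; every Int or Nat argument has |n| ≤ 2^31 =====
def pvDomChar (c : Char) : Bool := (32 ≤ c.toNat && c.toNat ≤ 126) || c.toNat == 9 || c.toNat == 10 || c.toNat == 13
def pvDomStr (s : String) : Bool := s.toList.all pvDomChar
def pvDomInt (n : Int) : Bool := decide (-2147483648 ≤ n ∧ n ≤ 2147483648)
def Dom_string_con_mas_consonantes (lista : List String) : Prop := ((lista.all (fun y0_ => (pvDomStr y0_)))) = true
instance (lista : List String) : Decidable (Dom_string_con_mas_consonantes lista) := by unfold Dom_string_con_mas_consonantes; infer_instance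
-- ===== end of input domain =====

-- ===== PORT A =====
-- B replaces A's fused count-and-track loop by a stable sort of the indices by negated
-- consonant count and taking the first index of that order ("alternative", not faster).
-- helper of A: contar_consonantes(palabra)  ('char in consonantes' is single-char membership, ported exactly as list membership)
def contar_consonantes (palabra : String) : Int :=
  let consonantes : List Char := "bcdfghjklmnpqrstvwxyzBCDFGHJKLMNPQRSTVWXYZ".toList
  palabra.toList.foldl (fun acc char => if consonantes.contains char then acc + 1 else acc) 0

def string_con_mas_consonantes (lista : List String) : String × Int × Int :=
  let st := (PySem.List.enumerate lista 0).foldl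
    (fun (s : Int × String × Int) p =>
      let num_consonantes := contar_consonantes p.2
      if num_consonantes > s.1 then (num_consonantes, p.2, p.1) else s)
    (-1, "", -1)
  (st.2.1, PySem.Str.len st.2.1, st.2.2)

-- ===== PORT B =====
-- helper of B: the key's consonant count of one word ('ch in CONS' on a 1-char ch is char membership)
def pvCountB (w : String) : Int :=
  let cons : List Char := "bcdfghjklmnpqrstvwxyzBCDFGHJKLMNPQRSTVWXYZ".toList
  ((w.toList.filter (fun c => cons.contains c)).length : Int)

def string_con_mas_consonantes_alt (lista : List String) : String × Int × Int :=
  match lista with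
  | [] => ("", 0, -1)
  | _ =>
    -- order = sorted(range(len(lista)), key=lambda i: -count(lista[i]))  (stable ascending sort)
    let order := PySem.List.sorted (PySem.List.pyRange 0 (lista.length : Int) 1)
      (fun i => -(pvCountB (PySem.List.pyGetD lista i ""))) false
    -- best = order[0]  (order is nonempty here since lista is)
    let best := PySem.List.pyGetD order 0 (-1)
    let w := PySem.List.pyGetD lista best ""
    (w, PySem.Str.len w, best)

def Spec_string_con_mas_consonantes (lista : List String) (out : String × Int × Int) : Prop := out = string_con_mas_consonantes_alt lista
instance (lista : List String) (out : String × Int × Int) : Decidable (Spec_string_con_mas_consonantes lista out) := by unfold Spec_string_con_mas_consonantes; infer_instance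

-- ===== CLAIM (what is proved, stated in full; the proofs are below) =====
def Claim_equal_string_con_mas_consonantes : Prop := ∀ (lista : List String), Dom_string_con_mas_consonantes lista → Spec_string_con_mas_consonantes lista (string_con_mas_consonantes lista)

-- ===== LEMMAS AND PROOFS =====

set_option maxRecDepth 8192 in
lemma pvCount_eq (w : String) : contar_consonantes w = pvCountB w := by
  unfold contar_consonantes pvCountB
  rw [PySem.List.foldl_if_add_one (p := fun c => List.contains "bcdfghjklmnpqrstvwxyzBCDFGHJKLMNPQRSTVWXYZ".toList c)]
  rw [List.countP_eq_length_filter, zero_add]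

lemma pvCount_nonneg (w : String) : 0 ≤ pvCountB w := by
  unfold pvCountB
  positivity

-- insertBy compares its argument only with list elements: keys equal there give equal results
lemma pv_insertBy_congr (k1 k2 : Int → Int) (x : Int) (ys : List Int)
    (hx : k1 x = k2 x) (h : ∀ y ∈ ys, k1 y = k2 y) :
    PySem.List.insertBy (fun a b => decide (k1 a < k1 b)) x ys
    = PySem.List.insertBy (fun a b => decide (k2 a < k2 b)) x ys := by
  induction ys with
  | nil => rfl
  | cons y t ih =>
    have hy : k1 y = k2 y := h y (by simp)
    have ht := ih (fun z hz => h z (by simp [hz]))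
    simp only [PySem.List.insertBy, hx, hy, ht]

lemma pv_foldl_insertBy_congr (k1 k2 : Int → Int) :
    ∀ (xs : List Int), (∀ x ∈ xs, k1 x = k2 x) →
    ∀ (acc : List Int), (∀ y ∈ acc, k1 y = k2 y) →
      xs.foldl (fun acc x => PySem.List.insertBy (fun a b => decide (k1 a < k1 b)) x acc) acc
      = xs.foldl (fun acc x => PySem.List.insertBy (fun a b => decide (k2 a < k2 b)) x acc) acc := by
  intro xs
  induction xs with
  | nil => intro _ acc _; rfl
  | cons x t ih =>
    intro h acc hacc
    have hx : k1 x = k2 x := h x (by simp)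
    have hins := pv_insertBy_congr k1 k2 x acc hx hacc
    simp only [List.foldl_cons, hins]
    refine ih (fun z hz => h z (by simp [hz])) _ (fun y hy => ?_)
    rw [PySem.List.mem_insertBy] at hy
    rcases hy with rfl | hy
    · exact hx
    · exact hacc y hy

lemma pv_sorted_congr (xs : List Int) (k1 k2 : Int → Int)
    (h : ∀ x ∈ xs, k1 x = k2 x) :
    PySem.List.sorted xs k1 false = PySem.List.sorted xs k2 false := by
  rw [PySem.List.sorted_eq_foldl_insertBy, PySem.List.sorted_eq_foldl_insertBy]
  exact pv_foldl_insertBy_congr k1 k2 xs h [] (by simp)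

-- head of an insertBy step: the new element wins iff it sorts strictly before the old head
lemma pv_head_insertBy (before : Int → Int → Bool) (x y : Int) (t : List Int) :
    (PySem.List.insertBy before x (y :: t)).head?
    = some (if before x y then x else y) := by
  simp only [PySem.List.insertBy]
  split <;> simp

-- A's fused fold lands exactly on the head of B's sorted index order
lemma pv_main (lista : List String) (hne : lista ≠ []) :
    ∃ b : Nat, b < lista.length ∧
      (PySem.List.sorted (PySem.List.pyRange 0 (lista.length : Int) 1)
        (fun i => -(pvCountB (PySem.List.pyGetD lista i ""))) false).head? = some (b : Int) ∧
      (PySem.List.enumerate lista 0).foldl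
        (fun (s : Int × String × Int) p =>
          let num_consonantes := contar_consonantes p.2
          if num_consonantes > s.1 then (num_consonantes, p.2, p.1) else s)
        (-1, "", -1)
      = (pvCountB (lista.getD b ""), lista.getD b "", (b : Int)) := by
  induction lista using List.reverseRecOn with
  | nil => exact absurd rfl hne
  | append_singleton l w ih =>
    by_cases hl : l = []
    · subst hl
      refine ⟨0, by simp, ?_, ?_⟩
      · rw [show ((([] : List String) ++ [w]).length : Int) = 0 + 1 by simp,
            PySem.List.pyRange_one_singleton, PySem.List.sorted_eq_foldl_insertBy]
        simp [PySem.List.insertBy]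
      · rw [show ([] : List String) ++ [w] = [w] from rfl]
        rw [PySem.List.enumerate_cons, PySem.List.enumerate_nil]
        have h0 : 0 ≤ pvCountB w := pvCount_nonneg w
        simp [List.foldl_cons, pvCount_eq]
        omega
    · obtain ⟨b, hb, hhead, hfold⟩ := ih hl
      have hkey : ∀ x ∈ PySem.List.pyRange 0 (l.length : Int) 1,
          (fun i => -(pvCountB (PySem.List.pyGetD (l ++ [w]) i ""))) x
          = (fun i => -(pvCountB (PySem.List.pyGetD l i ""))) x := by
        intro x hx
        rw [PySem.List.mem_pyRange_one] at hx
        obtain ⟨hx0, hx1⟩ := hx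
        obtain ⟨n, rfl⟩ : ∃ n : Nat, x = (n : Int) := ⟨x.toNat, (Int.toNat_of_nonneg hx0).symm⟩
        have hn : n < l.length := by exact_mod_cast hx1
        simp only [PySem.List.pyGetD_natCast]
        rw [List.getD_eq_getElem _ _ (by simp; omega), List.getD_eq_getElem _ _ hn,
            List.getElem_append_left hn]
      have hb' : PySem.List.pyGetD (l ++ [w]) (b : Int) "" = l.getD b "" := by
        rw [PySem.List.pyGetD_natCast, List.getD_eq_getElem _ _ (by simp; omega),
            List.getElem_append_left hb, List.getD_eq_getElem _ _ hb]
      have hw' : PySem.List.pyGetD (l ++ [w]) ((l.length : Nat) : Int) "" = w := by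
        rw [PySem.List.pyGetD_natCast, List.getD_eq_getElem _ _ (by simp),
            List.getElem_append_right (by simp)]
        simp
      have hlen : (((l ++ [w]).length : Nat) : Int) = (l.length : Int) + 1 := by simp
      obtain ⟨t, ht⟩ : ∃ t, PySem.List.sorted (PySem.List.pyRange 0 (l.length : Int) 1)
          (fun i => -(pvCountB (PySem.List.pyGetD l i ""))) false = (b : Int) :: t := by
        cases hcase : PySem.List.sorted (PySem.List.pyRange 0 (l.length : Int) 1)
            (fun i => -(pvCountB (PySem.List.pyGetD l i ""))) false with
        | nil => rw [hcase] at hhead; simp at hhead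
        | cons y t => rw [hcase] at hhead; simp at hhead; exact ⟨t, by rw [hhead]⟩
      have hnew : (PySem.List.sorted (PySem.List.pyRange 0 (((l ++ [w]).length : Nat) : Int) 1)
            (fun i => -(pvCountB (PySem.List.pyGetD (l ++ [w]) i ""))) false).head?
          = some (if pvCountB (l.getD b "") < pvCountB w then ((l.length : Nat) : Int)
            else (b : Int)) := by
        rw [hlen, PySem.List.pyRange_one_succ_right (by positivity),
            PySem.List.sorted_eq_foldl_insertBy, List.foldl_append,
            ← PySem.List.sorted_eq_foldl_insertBy,
            pv_sorted_congr _ _ _ hkey, ht]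
        simp only [List.foldl_cons, List.foldl_nil]
        rw [pv_head_insertBy, hw', hb']
        by_cases hc : pvCountB (l.getD b "") < pvCountB w
        · rw [if_pos (by simpa using hc), if_pos hc]
        · rw [if_neg (by simpa using hc), if_neg hc]
      rw [PySem.List.enumerate_append, List.foldl_append, hfold]
      simp only [PySem.List.enumerate_cons, PySem.List.enumerate_nil, List.foldl_cons,
        List.foldl_nil, pvCount_eq]
      by_cases hc : pvCountB (l.getD b "") < pvCountB w
      · refine ⟨l.length, by simp, ?_, ?_⟩
        · rw [hnew, if_pos hc]
        · rw [if_pos (by simpa using hc)]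
          rw [List.getD_eq_getElem _ _ (by simp), List.getElem_append_right (by simp)]
          simp
      · refine ⟨b, by simp; omega, ?_, ?_⟩
        · rw [hnew, if_neg hc]
        · rw [if_neg (by simpa using hc)]
          have hgd : (l ++ [w]).getD b "" = l.getD b "" := by
            rw [List.getD_eq_getElem _ _ (show b < (l ++ [w]).length by simp; omega),
                List.getElem_append_left hb, List.getD_eq_getElem _ _ hb]
          rw [hgd]

-- ===== VERDICT (by name: the statement is the Claim_ definition above) =====
theorem string_con_mas_consonantes_spec : Claim_equal_string_con_mas_consonantes := by
  intro lista _
  unfold Spec_string_con_mas_consonantes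
  cases lista with
  | nil => decide
  | cons x t =>
    obtain ⟨b, hb, hhead, hfold⟩ := pv_main (x :: t) (by simp)
    obtain ⟨tl, htl⟩ : ∃ tl, PySem.List.sorted (PySem.List.pyRange 0 (((x :: t).length : Nat) : Int) 1)
        (fun i => -(pvCountB (PySem.List.pyGetD (x :: t) i ""))) false = (b : Int) :: tl := by
      cases hcase : PySem.List.sorted (PySem.List.pyRange 0 (((x :: t).length : Nat) : Int) 1)
          (fun i => -(pvCountB (PySem.List.pyGetD (x :: t) i ""))) false with
      | nil => rw [hcase] at hhead; simp at hhead
      | cons y tl => rw [hcase] at hhead; simp at hhead; exact ⟨tl, by rw [hhead]⟩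
    show string_con_mas_consonantes (x :: t) = string_con_mas_consonantes_alt (x :: t)
    unfold string_con_mas_consonantes string_con_mas_consonantes_alt
    rw [hfold]
    simp only [htl, PySem.List.pyGetD_zero_cons, PySem.List.pyGetD_natCast]
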